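-- pv_equiv track=rewrite | github.com/tuannm-1876/sec-exercises | 0x09/solve/ex2-0x09.py | check
-- ===== SOURCE A (Python) =====
-- def check(flag):
--     a = 256
--     n = 10 ** 60
--     l = len(flag)
--     result = 0
--     for i in range(0, l):
--         result += ord(flag[i]) * a ** (l - i - 1) % n
--     return result
-- ===== SOURCE B (Python) =====
-- def check(flag):
--     n = 10 ** 60
--     result = 0
--     p = 1
--     for ch in reversed(flag):
--         result += ord(ch) * p % n
--         p = p * 256 % n
--     return result
-- ===== Notes on version B (the rewrite author's own statement) =====
-- stated objective: faster
-- what changed: B walks the string once in reverse, maintaining the running power 256^e mod n incrementally, instead of recomputing the huge bigint power 256^(l-i-1) from scratch for every character.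
import Mathlib
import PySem

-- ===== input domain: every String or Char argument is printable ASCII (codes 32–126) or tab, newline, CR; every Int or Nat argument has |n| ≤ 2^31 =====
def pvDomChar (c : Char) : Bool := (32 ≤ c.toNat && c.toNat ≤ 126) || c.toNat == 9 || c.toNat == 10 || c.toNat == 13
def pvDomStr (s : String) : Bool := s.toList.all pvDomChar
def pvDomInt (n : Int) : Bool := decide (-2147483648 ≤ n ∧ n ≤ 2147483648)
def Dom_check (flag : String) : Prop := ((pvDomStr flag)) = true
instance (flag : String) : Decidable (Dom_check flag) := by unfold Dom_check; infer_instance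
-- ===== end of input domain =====

-- B replaces A's per-term recomputation of 256^(l-i-1) by one reverse pass that
-- maintains the running power modulo n (objective: faster, asymptotic).

-- ===== PORT A =====
def check (flag : String) : Int :=
  let a : Int := 256
  let n : Int := 10 ^ 60
  let cs := flag.toList
  let l : Int := cs.length
  (PySem.List.pyRange 0 l 1).foldl
    (fun result i =>
      result + PySem.Int.mod (((PySem.List.pyGetD cs i ' ').toNat : Int) * a ^ (l - i - 1).toNat) n)
    0

-- ===== PORT B =====
def check_alt (flag : String) : Int :=
  let n : Int := 10 ^ 60
  (flag.toList.reverse.foldl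
    (fun (st : Int × Int) ch =>
      (st.1 + PySem.Int.mod ((ch.toNat : Int) * st.2) n, PySem.Int.mod (st.2 * 256) n))
    ((0 : Int), (1 : Int))).1

-- ===== PRECONDITION & SPEC =====
def Spec_check (flag : String) (out : Int) : Prop := out = check_alt flag
instance (flag : String) (out : Int) : Decidable (Spec_check flag out) := by unfold Spec_check; infer_instance

-- ===== CLAIM (what is proved, stated in full; the proofs are below) =====
def Claim_equal_check : Prop := ∀ (flag : String), Dom_check flag → Spec_check flag (check flag)

-- ===== LEMMAS AND PROOFS =====

-- the modulus
def NN : Int := 10 ^ 60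

-- the per-character term sum of A, as a function of the character list
def sumA (cs : List Char) : Int :=
  ((List.range cs.length).map
    (fun k => ((cs.getD k ' ').toNat : Int) * 256 ^ (cs.length - 1 - k) % NN)).sum

-- B's remaining terms: characters ds starting at exponent k
def sumB : List Char → Nat → Int
  | [], _ => 0
  | c :: ds, k => (c.toNat : Int) * 256 ^ k % NN + sumB ds (k + 1)

theorem NN_pos : (0 : Int) < NN := by norm_num [NN]

theorem mod_NN (x : Int) : PySem.Int.mod x NN = x % NN :=
  PySem.Int.mod_eq_emod_of_pos NN_pos

-- B's fold, with second component 256^k % NN, accumulates sumB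
theorem foldB (ds : List Char) (res : Int) (k : Nat) :
    (ds.foldl
      (fun (st : Int × Int) ch =>
        (st.1 + (ch.toNat : Int) * st.2 % NN, st.2 * 256 % NN))
      (res, 256 ^ k % NN)).1 = res + sumB ds k := by
  induction ds generalizing res k with
  | nil => simp [sumB]
  | cons c ds ih =>
    simp only [List.foldl_cons]
    have h1 : (c.toNat : Int) * (256 ^ k % NN) % NN = (c.toNat : Int) * 256 ^ k % NN := by
      rw [Int.mul_emod, Int.emod_emod_of_dvd _ (dvd_refl NN), ← Int.mul_emod]
    have h2 : 256 ^ k % NN * 256 % NN = 256 ^ (k + 1) % NN := by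
      rw [Int.mul_emod, Int.emod_emod_of_dvd _ (dvd_refl NN), ← Int.mul_emod, pow_succ]
    rw [h1, h2, ih, sumB]
    ring

theorem sumB_append (xs : List Char) (c : Char) (k : Nat) :
    sumB (xs ++ [c]) k = sumB xs k + (c.toNat : Int) * 256 ^ (k + xs.length) % NN := by
  induction xs generalizing k with
  | nil => simp [sumB]
  | cons x xs ih =>
    simp only [List.cons_append, sumB, ih, List.length_cons]
    have : k + 1 + xs.length = k + (xs.length + 1) := by omega
    rw [this]
    ring

theorem sumA_cons (c : Char) (cs : List Char) :
    sumA (c :: cs) = (c.toNat : Int) * 256 ^ cs.length % NN + sumA cs := by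
  simp only [sumA, List.length_cons, List.range_succ_eq_map, List.map_cons, List.map_map,
    List.sum_cons]
  congr 1
  apply congrArg List.sum
  apply List.map_congr_left
  intro k hk
  simp only [List.mem_range] at hk
  simp only [Function.comp_apply]
  simp only [List.getD_cons_succ]
  have h2 : cs.length + 1 - 1 - Nat.succ k = cs.length - 1 - k := by omega
  rw [h2]

theorem sumB_rev (cs : List Char) : sumB cs.reverse 0 = sumA cs := by
  induction cs with
  | nil => simp [sumA, sumB]
  | cons c cs ih =>
    rw [List.reverse_cons, sumB_append, ih, sumA_cons, List.length_reverse, Nat.zero_add]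
    exact add_comm _ _

-- A's fold equals sumA
theorem checkA_eq (flag : String) : check flag = sumA flag.toList := by
  unfold check
  simp only []
  set cs := flag.toList with hcs
  rw [PySem.List.foldl_add (g := fun i =>
    PySem.Int.mod (((PySem.List.pyGetD cs i ' ').toNat : Int) * 256 ^ (((cs.length : Int)) - i - 1).toNat) (10 ^ 60))]
  rw [PySem.List.pyRange_one]
  unfold sumA
  rw [zero_add]
  simp only [Int.sub_zero, Int.toNat_natCast]
  rw [List.map_map]
  congr 1
  apply List.map_congr_left
  intro k hk
  simp only [List.mem_range] at hk
  simp only [Function.comp_apply, zero_add]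
  rw [PySem.List.pyGetD_natCast]
  have hexp : (((cs.length : Int)) - (k : Int) - 1).toNat = cs.length - 1 - k := by omega
  rw [hexp]
  norm_num [NN]

theorem checkB_eq (flag : String) : check_alt flag = sumB flag.toList.reverse 0 := by
  unfold check_alt
  have h1 : (1 : Int) = 256 ^ 0 % NN := by norm_num [NN]
  have hN : (10 : Int) ^ 60 = NN := by norm_num [NN]
  simp only [hN, mod_NN]
  have := foldB flag.toList.reverse 0 0
  rw [← h1] at this
  rw [this, zero_add]

-- ===== VERDICT (by name: the statement is the Claim_ definition above) =====
theorem check_spec : Claim_equal_check := by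
  intro flag _
  unfold Spec_check
  rw [checkA_eq, checkB_eq, sumB_rev]
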